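-- pv_equiv track=rewrite | github.com/wlaixy26/project | sortpractice.py | ef
-- ===== SOURCE A (Python) =====
-- def ef(li,val):
--     li.sort()
--     left = 0
--     right = len(li)-1
--     while left <= right:
--         mid = (left+right)//2
--         if li[mid] < val:
--             left = mid+1
--         elif li[mid] > val:
--             right = mid-1
--         else:
--           return True
--     return False
-- ===== SOURCE B (Python) =====
-- def ef(li, val):
--     li.sort()
--     return val in li
-- ===== Notes on version B (the rewrite author's own statement) =====
-- stated objective: idiomatic
-- what changed: Replaces the hand-written binary-search loop after the sort with Python's built-in linear membership test 'val in li'.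
import Mathlib
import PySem

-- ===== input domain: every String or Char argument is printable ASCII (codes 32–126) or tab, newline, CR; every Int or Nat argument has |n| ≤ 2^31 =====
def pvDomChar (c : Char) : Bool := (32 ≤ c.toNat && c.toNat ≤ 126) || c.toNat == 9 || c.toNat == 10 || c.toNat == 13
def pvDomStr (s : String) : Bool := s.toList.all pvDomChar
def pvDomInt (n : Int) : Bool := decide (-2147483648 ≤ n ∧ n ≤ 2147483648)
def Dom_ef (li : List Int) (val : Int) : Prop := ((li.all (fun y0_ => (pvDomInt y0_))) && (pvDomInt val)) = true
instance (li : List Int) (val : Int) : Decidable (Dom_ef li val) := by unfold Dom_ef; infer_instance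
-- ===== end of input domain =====

-- B replaces the hand-written binary-search loop after the sort with a plain membership
-- test; Python A mutates its argument in place (li.sort()) and B performs the same mutation,
-- the equivalence proved here is about the return value.

-- ===== PORT A =====
-- the 'while left <= right' loop of A; indices stay inside the list on every reachable state
def efLoop (s : List Int) (val : Int) (left right : Int) : Bool :=
  if h : left ≤ right then
    let mid := PySem.Int.floordiv (left + right) 2
    if PySem.List.pyGetD s mid 0 < val then
      efLoop s val (mid + 1) right
    else if val < PySem.List.pyGetD s mid 0 then
      efLoop s val left (mid - 1)
    else true
  else false
termination_by (right + 1 - left).toNat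
decreasing_by
  · have := PySem.Int.floordiv_two_mid_bounds h; omega
  · have := PySem.Int.floordiv_two_mid_bounds h; omega

def ef (li : List Int) (val : Int) : Bool :=
  let s := PySem.List.sorted li (fun x => x) false
  efLoop s val 0 ((s.length : Int) - 1)

-- ===== PORT B =====
def ef_alt (li : List Int) (val : Int) : Bool :=
  let s := PySem.List.sorted li (fun x => x) false
  decide (val ∈ s)

-- ===== PRECONDITION & SPEC =====
def Spec_ef (li : List Int) (val : Int) (out : Bool) : Prop := out = ef_alt li val
instance (li : List Int) (val : Int) (out : Bool) : Decidable (Spec_ef li val out) := by unfold Spec_ef; infer_instance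

-- ===== CLAIM (what is proved, stated in full; the proofs are below) =====
def Claim_equal_ef : Prop := ∀ (li : List Int) (val : Int), Dom_ef li val → Spec_ef li val (ef li val)

-- ===== LEMMAS AND PROOFS =====

-- when the search window is empty and everything outside it is ≠ val, val is not in s
theorem ef_not_mem (s : List Int) (val l r : Int)
    (hlr : r < l)
    (hL : ∀ (k : Nat) (hk : k < s.length), (k : Int) < l → s[k] < val)
    (hR : ∀ (k : Nat) (hk : k < s.length), r < (k : Int) → val < s[k]) :
    val ∉ s := by
  intro hv
  obtain ⟨k, hk, hks⟩ := List.mem_iff_getElem.mp hv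
  by_cases hkl : (k : Int) < l
  · have := hL k hk hkl; omega
  · have := hR k hk (by omega); omega

-- loop invariant: everything strictly outside [l, r] differs from val
theorem efLoop_correct (s : List Int) (val : Int) (hs : s.Pairwise (· ≤ ·)) :
    ∀ (n : Nat) (l r : Int), (r + 1 - l).toNat ≤ n → 0 ≤ l → r < (s.length : Int) →
    (∀ (k : Nat) (hk : k < s.length), (k : Int) < l → s[k] < val) →
    (∀ (k : Nat) (hk : k < s.length), r < (k : Int) → val < s[k]) →
    efLoop s val l r = decide (val ∈ s) := by
  have hmono := List.pairwise_iff_getElem.mp hs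
  intro n
  induction n with
  | zero =>
    intro l r hn hl hr hL hR
    rw [efLoop]
    have h : ¬ l ≤ r := by omega
    simp [h, ef_not_mem s val l r (by omega) hL hR]
  | succ n ih =>
    intro l r hn hl hr hL hR
    by_cases h : l ≤ r
    · rw [efLoop]
      simp only [h, reduceDIte]
      obtain ⟨hm1, hm2⟩ := PySem.Int.floordiv_two_mid_bounds (lo := l) (hi := r) h
      set mid := PySem.Int.floordiv (l + r) 2 with hmid
      have hmlen : mid.toNat < s.length := by omega
      have hget : PySem.List.pyGetD s mid 0 = s[mid.toNat] :=
        PySem.List.pyGetD_eq_getElem _ _ (by omega) (by omega)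
      split_ifs with h1 h2
      · refine ih (mid + 1) r (by omega) (by omega) hr ?_ hR
        intro k hk hkl
        by_cases hkl' : (k : Int) < l
        · exact hL k hk hkl'
        · rcases Nat.lt_or_ge k mid.toNat with hc | hc
          · have := hmono k mid.toNat hk hmlen hc
            rw [hget] at h1; omega
          · have : k = mid.toNat := by omega
            subst this; rw [hget] at h1; omega
      · refine ih l (mid - 1) (by omega) hl (by omega) hL ?_
        intro k hk hkr
        by_cases hkr' : r < (k : Int)
        · exact hR k hk hkr'
        · rcases Nat.lt_or_ge mid.toNat k with hc | hc
          · have := hmono mid.toNat k hmlen hk hc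
            rw [hget] at h2; omega
          · have : k = mid.toNat := by omega
            subst this; rw [hget] at h2; omega
      · have hv : val ∈ s := by
          have heq : s[mid.toNat] = val := by rw [hget] at h1 h2; omega
          exact heq ▸ List.getElem_mem hmlen
        simp [hv]
    · rw [efLoop]
      simp [h, ef_not_mem s val l r (by omega) hL hR]

-- ===== VERDICT (by name: the statement is the Claim_ definition above) =====
theorem ef_spec : Claim_equal_ef := by
  intro li val _
  unfold Spec_ef ef ef_alt
  set s := PySem.List.sorted li (fun x => x) false with hs
  exact efLoop_correct s val (PySem.List.sorted_pairwise li (fun x => x))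
    s.length 0 ((s.length : Int) - 1) (by omega) (by omega) (by omega)
    (fun k hk hkl => by omega) (fun k hk hkr => by omega)
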